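-- pv_equiv track=rewrite | github.com/TylerMclaughlin/computational-harmony | computational-harmony/deepHarmony.py | isDeep
-- ===== SOURCE A (Python) =====
-- def isDeep(scale,s = 12):
--     # s is "subdivisions" (positive integer).  12 for chromatic scale (harmony)
--     # may want to do s = 16 or s = 32 for rhythms
--     # Returns True if and only if no repeating values, which is the definition of "deep "
--     # only looking at intervals not chords
--     frequencyList = []
--     for x in range(0,int(round(s/2))):  #  rounds up.  yields the range (0,6) for chromatic harmony
--         trialInterval = [0, x]
--         frequency = 0
--         for i in range(0,s):
--             transposedInterval = [(y + i) % s for y in trialInterval]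
--             if set(transposedInterval).issubset(set(scale)):
--                 frequency += 1
--         frequencyList.append(frequency)
--
--     return len(set(frequencyList)) == len(frequencyList) # cardinality == length implies no repeating values
-- ===== SOURCE B (Python) =====
-- def isDeep(scale, s=12):
--     # One histogram of all ordered pairwise differences of the on-notes,
--     # instead of A's per-interval transposition scan.
--     bound = int(round(s / 2))
--     member = set(scale)
--     notes = [i for i in range(s) if i in member]
--     counts = {}
--     for a in notes:
--         for b in notes:
--             k = (b - a) % s
--             counts[k] = counts.get(k, 0) + 1
--     freqList = [counts.get(x, 0) for x in range(bound)]
--     return len(set(freqList)) == len(freqList)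
-- ===== Notes on version B (the rewrite author's own statement) =====
-- stated objective: faster
-- what changed: Instead of re-scanning all s transpositions of [0,x] for every interval x, B collects the in-scale notes once, builds a single histogram of all ordered pairwise differences mod s, and reads each interval's frequency off the histogram.
import Mathlib
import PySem

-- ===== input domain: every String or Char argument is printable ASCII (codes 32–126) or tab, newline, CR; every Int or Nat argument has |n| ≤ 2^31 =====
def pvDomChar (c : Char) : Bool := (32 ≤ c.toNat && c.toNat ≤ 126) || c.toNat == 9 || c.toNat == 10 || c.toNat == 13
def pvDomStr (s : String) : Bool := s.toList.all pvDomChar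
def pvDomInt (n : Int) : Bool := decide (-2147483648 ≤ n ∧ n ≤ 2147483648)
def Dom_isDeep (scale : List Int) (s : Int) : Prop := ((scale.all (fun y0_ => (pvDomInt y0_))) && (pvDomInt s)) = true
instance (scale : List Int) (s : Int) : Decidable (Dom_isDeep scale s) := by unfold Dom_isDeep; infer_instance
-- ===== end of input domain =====

-- B builds one histogram of all ordered pairwise differences of the on-notes instead of
-- A's per-interval transposition scan; equivalence of the RETURN value is proved for all inputs.

-- Both Pythons compute `int(round(s / 2))`.  PySem has no floats; this helper is exact on the
-- domain |s| ≤ 2^31: s/2 is then an exact binary float k or k+0.5 (k = s//2), and Python's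
-- round uses half-to-even, so the result is s//2 when s is even, else s//2 rounded up to even.
def pvBound (s : Int) : Int :=
  if PySem.Int.mod s 2 == 0 then PySem.Int.floordiv s 2
  else if PySem.Int.mod (PySem.Int.floordiv s 2) 2 == 0 then PySem.Int.floordiv s 2
  else PySem.Int.floordiv s 2 + 1

-- ===== PORT A =====
def isDeep (scale : List Int) (s : Int) : Bool :=
  let frequencyList : List Int :=
    (PySem.List.pyRange 0 (pvBound s) 1).foldl (fun acc x =>
      let trialInterval : List Int := [0, x]
      let frequency : Int :=
        (PySem.List.pyRange 0 s 1).foldl (fun freq i =>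
          let transposedInterval := trialInterval.map (fun y => PySem.Int.mod (y + i) s)
          if PySem.Set.issubset (PySem.Set.ofList transposedInterval) (PySem.Set.ofList scale)
          then freq + 1 else freq) 0
      acc ++ [frequency]) []
  PySem.Set.len (PySem.Set.ofList frequencyList) == PySem.List.len frequencyList

-- ===== PORT B =====
def isDeep_alt (scale : List Int) (s : Int) : Bool :=
  let bound := pvBound s
  let member := PySem.Set.ofList scale
  let notes := (PySem.List.pyRange 0 s 1).filter (fun i => PySem.Set.contains member i)
  let counts : PySem.Dict Int Int :=
    notes.foldl (fun d a =>
      notes.foldl (fun d b => d.modify (PySem.Int.mod (b - a) s) 0 (· + 1)) d)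
      PySem.Dict.empty
  let freqList := (PySem.List.pyRange 0 bound 1).map (fun x => counts.getD x 0)
  PySem.Set.len (PySem.Set.ofList freqList) == PySem.List.len freqList

-- ===== PRECONDITION & SPEC =====
def Spec_isDeep (scale : List Int) (s : Int) (out : Bool) : Prop := out = isDeep_alt scale s
instance (scale : List Int) (s : Int) (out : Bool) : Decidable (Spec_isDeep scale s out) := by unfold Spec_isDeep; infer_instance

-- ===== CLAIM (what is proved, stated in full; the proofs are below) =====
def Claim_equal_isDeep : Prop := ∀ (scale : List Int) (s : Int), Dom_isDeep scale s → Spec_isDeep scale s (isDeep scale s)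

-- ===== LEMMAS AND PROOFS =====

lemma pvBound_le {s : Int} (hs : 0 < s) : pvBound s ≤ s := by
  unfold pvBound
  rw [PySem.Int.mod_eq_emod_of_pos (by norm_num), PySem.Int.mod_eq_emod_of_pos (by norm_num),
      PySem.Int.floordiv_eq_ediv_of_pos (by norm_num)]
  split_ifs <;> omega

lemma mod_shift {a b x s : Int} (hb : 0 ≤ b) (hb2 : b < s)
    (hx : 0 ≤ x) (hx2 : x < s) : ((b - a) % s = x ↔ b = (a + x) % s) := by
  constructor
  · intro h
    have : (a + x) % s = (a + (b - a) % s) % s := by rw [h]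
    rw [this, Int.add_emod, Int.emod_emod_of_dvd _ dvd_rfl, ← Int.add_emod]
    simp only [add_sub_cancel]
    exact (Int.emod_eq_of_lt hb hb2).symm
  · intro h
    rw [h, Int.sub_emod, Int.emod_emod_of_dvd _ dvd_rfl, ← Int.sub_emod, add_sub_cancel_left]
    exact Int.emod_eq_of_lt hx hx2

lemma nodup_count (l : List Int) (c : Int) (h : l.Nodup) :
    (l.count c : Int) = if c ∈ l then 1 else 0 := by
  split_ifs with hm
  · exact_mod_cast List.count_eq_one_of_mem h hm
  · exact_mod_cast List.count_eq_zero_of_not_mem hm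

lemma outer_getD (s x : Int) (notes : List Int) (ns : List Int) (d : PySem.Dict Int Int) :
    (ns.foldl (fun d a => notes.foldl (fun d b => d.modify (PySem.Int.mod (b - a) s) 0 (· + 1)) d) d).getD x 0
      = d.getD x 0 + ((ns.map (fun a => ((notes.map (fun b => PySem.Int.mod (b - a) s)).count x : Int))).sum) := by
  induction ns generalizing d with
  | nil => simp
  | cons a t ih =>
    simp only [List.foldl_cons, List.map_cons, List.sum_cons, ih]
    rw [← List.foldl_map (f := fun b => PySem.Int.mod (b - a) s)
          (g := fun (d : PySem.Dict Int Int) k => d.modify k 0 (· + 1)),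
        PySem.Dict.getD_foldl_modify_add_one]
    ring

lemma freq_eq (scale : List Int) (s x : Int) (hx : 0 ≤ x) (hxb : x < pvBound s) :
    ((PySem.List.pyRange 0 s 1).foldl (fun freq i =>
        if PySem.Set.issubset
            (PySem.Set.ofList (([0, x] : List Int).map (fun y => PySem.Int.mod (y + i) s)))
            (PySem.Set.ofList scale)
        then freq + 1 else freq) 0 : Int)
    = (((PySem.List.pyRange 0 s 1).filter (fun i => PySem.Set.contains (PySem.Set.ofList scale) i)).foldl
        (fun d a =>
          ((PySem.List.pyRange 0 s 1).filter (fun i => PySem.Set.contains (PySem.Set.ofList scale) i)).foldl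
            (fun d b => d.modify (PySem.Int.mod (b - a) s) 0 (· + 1)) d)
        PySem.Dict.empty).getD x 0 := by
  by_cases hs : 0 < s
  case neg =>
    rw [PySem.List.pyRange_one_eq_nil (by omega)]
    simp
  case pos =>
    have hxs : x < s := lt_of_lt_of_le hxb (pvBound_le hs)
    set notes := (PySem.List.pyRange 0 s 1).filter (fun i => PySem.Set.contains (PySem.Set.ofList scale) i) with hnotes
    have hmemnotes : ∀ c : Int, c ∈ notes ↔ (0 ≤ c ∧ c < s ∧ c ∈ scale) := by
      intro c
      simp [hnotes, List.mem_filter, PySem.List.mem_pyRange_one, PySem.Set.mem_ofList, and_assoc]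
    have hnd : notes.Nodup := List.Nodup.filter _ (PySem.List.nodup_pyRange_one 0 s)
    rw [outer_getD, PySem.Dict.getD_empty, zero_add]
    -- left side: a 0/1 count over range(s)
    rw [PySem.List.foldl_if_add_one, zero_add]
    -- right side: turn each count into an indicator, then the sum into a count
    have hterm : ∀ a ∈ notes,
        ((notes.map (fun b => PySem.Int.mod (b - a) s)).count x : Int)
          = if PySem.Int.mod (a + x) s ∈ notes then 1 else 0 := by
      intro a _
      have : (notes.map (fun b => PySem.Int.mod (b - a) s)).count x
           = notes.count (PySem.Int.mod (a + x) s) := by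
        rw [List.count_eq_countP, List.countP_map, List.count_eq_countP]
        apply List.countP_congr
        intro b hb
        have hmb := (hmemnotes b).mp hb
        simp only [Function.comp_apply, beq_iff_eq,
          PySem.Int.mod_eq_emod_of_pos hs]
        exact mod_shift hmb.1 hmb.2.1 hx hxs
      rw [this, nodup_count _ _ hnd]
    rw [List.map_congr_left hterm]
    have := PySem.List.sum_map_ite_one_zero (fun a => decide (PySem.Int.mod (a + x) s ∈ notes)) notes
    simp only [decide_eq_true_eq] at this
    rw [this]
    -- both sides are countP over range(s); compare predicates on members
    rw [hnotes, List.countP_filter]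
    refine congrArg _ (List.countP_congr ?_)
    intro i hi
    have hir := PySem.List.mem_pyRange_one.mp hi
    have hmod : ∀ y : Int, 0 ≤ PySem.Int.mod y s ∧ PySem.Int.mod y s < s := by
      intro y
      rw [PySem.Int.mod_eq_emod_of_pos hs]
      exact ⟨Int.emod_nonneg _ (by omega), Int.emod_lt_of_pos _ hs⟩
    have hii : PySem.Int.mod (0 + i) s = i := by
      rw [PySem.Int.mod_eq_emod_of_pos hs, zero_add]
      exact Int.emod_eq_of_lt hir.1 hir.2
    constructor
    · intro h
      have hsub := (PySem.Set.issubset_iff _ _).mp h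
      simp only [PySem.Set.mem_ofList, List.mem_cons, List.map_cons,
        List.map_nil, List.not_mem_nil, or_false] at hsub
      have h1 : PySem.Int.mod (0 + i) s ∈ scale := by
        apply hsub; exact Or.inl rfl
      have h2 : PySem.Int.mod (x + i) s ∈ scale := by
        apply hsub; exact Or.inr rfl
      rw [hii] at h1
      have h3 : PySem.Int.mod (i + x) s ∈ notes := by
        rw [hmemnotes]
        refine ⟨(hmod (i + x)).1, (hmod (i + x)).2, ?_⟩
        rwa [add_comm i x]
      simp only [Bool.and_eq_true, decide_eq_true_eq]
      exact ⟨h3, (PySem.Set.contains_iff _ _).mpr ((PySem.Set.mem_ofList _ _).mpr h1)⟩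
    · intro h
      simp only [Bool.and_eq_true, decide_eq_true_eq] at h
      obtain ⟨h3, h1⟩ := h
      have h1' : i ∈ scale := (PySem.Set.mem_ofList _ _).mp ((PySem.Set.contains_iff _ _).mp h1)
      have h2 : PySem.Int.mod (x + i) s ∈ scale := by
        have h4 := ((hmemnotes _).mp h3).2.2
        rwa [add_comm i x] at h4
      rw [PySem.Set.issubset_iff]
      intro e he
      simp only [PySem.Set.mem_ofList, List.map_cons, List.map_nil, List.mem_cons,
        List.not_mem_nil, or_false] at he
      rcases he with he | he
      · subst he; rw [hii]; exact (PySem.Set.mem_ofList _ _).mpr h1'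
      · subst he; exact (PySem.Set.mem_ofList _ _).mpr h2

lemma freqList_eq (scale : List Int) (s : Int) :
    (PySem.List.pyRange 0 (pvBound s) 1).foldl (fun acc x =>
      acc ++ [((PySem.List.pyRange 0 s 1).foldl (fun freq i =>
        if PySem.Set.issubset
            (PySem.Set.ofList (([0, x] : List Int).map (fun y => PySem.Int.mod (y + i) s)))
            (PySem.Set.ofList scale)
        then freq + 1 else freq) 0 : Int)]) []
    = (PySem.List.pyRange 0 (pvBound s) 1).map (fun x =>
        (((PySem.List.pyRange 0 s 1).filter (fun i => PySem.Set.contains (PySem.Set.ofList scale) i)).foldl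
          (fun d a =>
            ((PySem.List.pyRange 0 s 1).filter (fun i => PySem.Set.contains (PySem.Set.ofList scale) i)).foldl
              (fun d b => d.modify (PySem.Int.mod (b - a) s) 0 (· + 1)) d)
          PySem.Dict.empty).getD x 0) := by
  rw [PySem.List.foldl_append_singleton_eq_map, List.nil_append]
  apply List.map_congr_left
  intro x hx
  have hxr := PySem.List.mem_pyRange_one.mp hx
  exact freq_eq scale s x hxr.1 hxr.2

-- ===== VERDICT (by name: the statement is the Claim_ definition above) =====
theorem isDeep_spec : Claim_equal_isDeep := by
  intro scale s _
  unfold Spec_isDeep isDeep isDeep_alt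
  simp only []
  rw [freqList_eq scale s]
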